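-- pv_equiv track=rewrite | github.com/hoxiansen/schedule | src/buding_sign.py | abcd4
-- ===== SOURCE A (Python) =====
-- def abcd4(_0x2d1e33, _0x4ccbfe):
--     _0x39c799 = list(_0x4ccbfe)
--     _0x368c45 = len(_0x4ccbfe)
--     for i in range(len(_0x2d1e33)):
--         _0x1e44d9 = int(_0x2d1e33[i])
--         _0x172ebc = _0x39c799[_0x1e44d9]
--         _0x939174 = _0x39c799[_0x368c45 - 1 - _0x1e44d9]
--         _0x39c799[_0x1e44d9] = _0x939174
--         _0x39c799[_0x368c45 - 0x1 - _0x1e44d9] = _0x172ebc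
--
--     _0x4ccbfe = _0x39c799
--     return ''.join(_0x4ccbfe)
-- ===== SOURCE B (Python) =====
-- def abcd4(_0x2d1e33, _0x4ccbfe):
--     n = len(_0x4ccbfe)
--     count = [0] * n
--     for ch in _0x2d1e33:
--         count[int(ch)] += 1  # same ValueError/IndexError points as A
--     return ''.join(
--         _0x4ccbfe[n - 1 - i] if (count[i] + count[n - 1 - i]) % 2 else _0x4ccbfe[i]
--         for i in range(n))
-- ===== Notes on version B (the rewrite author's own statement) =====
-- stated objective: alternative
-- what changed: A performs one symmetric in-place swap per digit of the first string; B instead builds a frequency table of the digit values in one pass and then produces the result in a single pass, swapping each mirror pair exactly when its two counts have odd total parity.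
import Mathlib
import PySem

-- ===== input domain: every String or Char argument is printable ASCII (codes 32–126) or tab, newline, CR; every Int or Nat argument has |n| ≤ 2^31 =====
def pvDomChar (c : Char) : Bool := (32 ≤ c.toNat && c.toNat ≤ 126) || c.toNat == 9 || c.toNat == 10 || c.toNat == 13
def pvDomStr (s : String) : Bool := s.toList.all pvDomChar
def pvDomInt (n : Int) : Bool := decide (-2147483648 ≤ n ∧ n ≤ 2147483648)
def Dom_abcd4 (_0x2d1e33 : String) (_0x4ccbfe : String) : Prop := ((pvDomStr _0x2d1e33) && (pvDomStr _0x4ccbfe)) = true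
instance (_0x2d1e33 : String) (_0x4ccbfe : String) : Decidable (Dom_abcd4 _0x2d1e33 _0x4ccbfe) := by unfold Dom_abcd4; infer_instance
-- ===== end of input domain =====

-- B replaces A's sequence of in-place symmetric swaps by one frequency count of the digit
-- string followed by a single parity-based pass building the result (objective: alternative).

-- ===== PORT A =====
-- one iteration of A's loop body; state is none once an exception (ValueError/IndexError) occurred
def abcd4Step (n : Int) (st : Option (List Char)) (c : Char) : Option (List Char) :=
  match st with
  | none => none
  | some l => do
      let d ← PySem.Int.ofChars? [c]                    -- int(_0x2d1e33[i])
      let x ← PySem.List.pyGet? l d                     -- _0x39c799[_0x1e44d9]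
      let y ← PySem.List.pyGet? l (n - 1 - d)           -- _0x39c799[_0x368c45 - 1 - _0x1e44d9]
      let l1 ← PySem.List.pySet? l d y
      PySem.List.pySet? l1 (n - 1 - d) x

def abcd4 (_0x2d1e33 : String) (_0x4ccbfe : String) : String :=
  match _0x2d1e33.toList.foldl (abcd4Step (_0x4ccbfe.toList.length : Int)) (some _0x4ccbfe.toList) with
  | some l => String.mk l                                -- ''.join(...)
  | none => ""                                           -- unreachable under Pre_ (Python raises)

-- ===== PORT B =====
-- one iteration of B's counting loop: count[int(ch)] += 1
def abcd4AltStep (st : Option (List Int)) (c : Char) : Option (List Int) :=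
  match st with
  | none => none
  | some cnt => do
      let d ← PySem.Int.ofChars? [c]
      let v ← PySem.List.pyGet? cnt d
      PySem.List.pySet? cnt d (v + 1)

def abcd4_alt (_0x2d1e33 : String) (_0x4ccbfe : String) : String :=
  match _0x2d1e33.toList.foldl abcd4AltStep (some (List.replicate _0x4ccbfe.toList.length (0 : Int))) with
  | none => ""                                           -- unreachable under Pre_ (Python raises)
  | some cnt =>
      String.mk ((PySem.List.pyRange 0 (_0x4ccbfe.toList.length : Int) 1).map (fun i =>
        if PySem.Int.mod (PySem.List.pyGetD cnt i 0 + PySem.List.pyGetD cnt ((_0x4ccbfe.toList.length : Int) - 1 - i) 0) 2 == 1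
        then PySem.List.pyGetD _0x4ccbfe.toList ((_0x4ccbfe.toList.length : Int) - 1 - i) ' '
        else PySem.List.pyGetD _0x4ccbfe.toList i ' '))

-- ===== PRECONDITION & SPEC =====
-- Pre_ admits exactly the inputs on which the Python A returns: every char of the first
-- string is a decimal digit (else int() raises ValueError) whose value is an index into
-- the second string (else IndexError).
def Pre_abcd4 (_0x2d1e33 : String) (_0x4ccbfe : String) : Prop :=
  (_0x2d1e33.toList.all (fun c =>
    c.isDigit && decide (c.toNat - 48 < _0x4ccbfe.toList.length))) = true
instance (_0x2d1e33 : String) (_0x4ccbfe : String) : Decidable (Pre_abcd4 _0x2d1e33 _0x4ccbfe) := by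
  unfold Pre_abcd4; infer_instance

def pvWitness_abcd4 : String × String := ("0120", "abcd")

def Spec_abcd4 (_0x2d1e33 : String) (_0x4ccbfe : String) (out : String) : Prop := out = abcd4_alt _0x2d1e33 _0x4ccbfe
instance (_0x2d1e33 : String) (_0x4ccbfe : String) (out : String) : Decidable (Spec_abcd4 _0x2d1e33 _0x4ccbfe out) := by unfold Spec_abcd4; infer_instance

-- ===== CLAIM (what is proved, stated in full; the proofs are below) =====
def Claim_equal_abcd4 : Prop := ∀ (_0x2d1e33 : String) (_0x4ccbfe : String), Dom_abcd4 _0x2d1e33 _0x4ccbfe → Pre_abcd4 _0x2d1e33 _0x4ccbfe → Spec_abcd4 _0x2d1e33 _0x4ccbfe (abcd4 _0x2d1e33 _0x4ccbfe)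

-- ===== LEMMAS AND PROOFS =====

-- a digit char parses to its value
theorem ofChars_digit (c : Char) (h : c.isDigit = true) :
    PySem.Int.ofChars? [c] = some ((c.toNat - 48 : Nat) : Int) := by
  have hb : 48 ≤ c.toNat ∧ c.toNat ≤ 57 := by
    simp only [Char.isDigit, decide_eq_true_eq, Bool.and_eq_true] at h
    exact ⟨UInt32.le_iff_toNat_le.mp h.1, UInt32.le_iff_toNat_le.mp h.2⟩
  have hc : c = Char.ofNat c.toNat := (Char.ofNat_toNat c).symm
  obtain ⟨h1, h2⟩ := hb
  rw [hc]
  interval_cases h : c.toNat <;> decide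

theorem getD_set_char (l : List Char) (i k : Nat) (v : Char) (h : i < l.length) :
    (l.set i v).getD k ' ' = if k = i then v else l.getD k ' ' := by
  rw [List.getD_eq_getElem?_getD, List.getD_eq_getElem?_getD, List.getElem?_set]
  by_cases hk : i = k
  · simp [← hk, h]
  · simp [hk]
    intro h'; exact absurd h'.symm hk

theorem getD_set_int (l : List Int) (i k : Nat) (v : Int) (h : i < l.length) :
    (l.set i v).getD k 0 = if k = i then v else l.getD k 0 := by
  rw [List.getD_eq_getElem?_getD, List.getD_eq_getElem?_getD, List.getElem?_set]
  by_cases hk : i = k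
  · simp [← hk, h]
  · simp [hk]
    intro h'; exact absurd h'.symm hk

-- the Nat-level model of A's loop body
def swapN (n : Nat) (l : List Char) (d : Nat) : List Char :=
  (l.set d (l.getD (n - 1 - d) ' ')).set (n - 1 - d) (l.getD d ' ')

-- the Nat-level model of B's counting loop body
def incrN (cnt : List Int) (d : Nat) : List Int := cnt.set d (cnt.getD d 0 + 1)

theorem length_swapN (n : Nat) (l : List Char) (d : Nat) : (swapN n l d).length = l.length := by
  simp [swapN]

-- A's step equals the model on in-range digit chars
theorem stepA_eq (n : Nat) (l : List Char) (c : Char) (hl : l.length = n)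
    (hd : c.isDigit = true) (hlt : c.toNat - 48 < n) :
    abcd4Step (n : Int) (some l) c = some (swapN n l (c.toNat - 48)) := by
  set d := c.toNat - 48 with hdd
  have h1 : ((d : Int)) < (l.length : Int) := by omega
  have h2 : n - 1 - d < n := by omega
  have hcast : (n : Int) - 1 - (d : Int) = ((n - 1 - d : Nat) : Int) := by omega
  simp only [abcd4Step, ofChars_digit c hd, ← hdd, Option.bind_eq_bind, Option.bind_some, hcast]
  rw [PySem.List.pyGet?_eq_some_getElem l (by omega) h1,
      PySem.List.pyGet?_eq_some_getElem l (by omega) (by omega)]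
  simp only [Option.bind_some, Int.toNat_natCast]
  rw [PySem.List.pySet?_natCast l d _ (by omega)]
  simp only [Option.bind_some]
  rw [PySem.List.pySet?_natCast _ (n - 1 - d) _ (by simp [hl]; omega)]
  simp [swapN, hl, List.getD_eq_getElem?_getD, List.getElem?_eq_getElem, hlt, h2]

-- B's step equals the model on in-range digit chars
theorem stepB_eq (n : Nat) (cnt : List Int) (c : Char) (hl : cnt.length = n)
    (hd : c.isDigit = true) (hlt : c.toNat - 48 < n) :
    abcd4AltStep (some cnt) c = some (incrN cnt (c.toNat - 48)) := by
  set d := c.toNat - 48 with hdd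
  simp only [abcd4AltStep, ofChars_digit c hd, ← hdd, Option.bind_eq_bind, Option.bind_some]
  rw [PySem.List.pyGet?_eq_some_getElem cnt (by omega) (by omega)]
  simp only [Option.bind_some, Int.toNat_natCast]
  rw [PySem.List.pySet?_natCast cnt d _ (by omega)]
  simp [incrN, List.getD_eq_getElem?_getD, List.getElem?_eq_getElem, hl, hlt]

-- A's fold equals the model fold over the digit values
theorem foldA_eq (n : Nat) (cs : List Char) (l : List Char) (hl : l.length = n)
    (h : ∀ c ∈ cs, c.isDigit = true ∧ c.toNat - 48 < n) :
    cs.foldl (abcd4Step (n : Int)) (some l)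
      = some ((cs.map (fun c => c.toNat - 48)).foldl (swapN n) l) := by
  induction cs generalizing l with
  | nil => rfl
  | cons c cs ih =>
      obtain ⟨hd, hlt⟩ := h c (by simp)
      simp only [List.foldl_cons, List.map_cons]
      rw [stepA_eq n l c hl hd hlt]
      exact ih _ (by rw [length_swapN]; exact hl) (fun c hc => h c (by simp [hc]))

-- B's fold equals the model fold over the digit values
theorem foldB_eq (n : Nat) (cs : List Char) (cnt : List Int) (hl : cnt.length = n)
    (h : ∀ c ∈ cs, c.isDigit = true ∧ c.toNat - 48 < n) :
    cs.foldl abcd4AltStep (some cnt)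
      = some ((cs.map (fun c => c.toNat - 48)).foldl incrN cnt) := by
  induction cs generalizing cnt with
  | nil => rfl
  | cons c cs ih =>
      obtain ⟨hd, hlt⟩ := h c (by simp)
      simp only [List.foldl_cons, List.map_cons]
      rw [stepB_eq n cnt c hl hd hlt]
      exact ih _ (by simp [incrN, hl]) (fun c hc => h c (by simp [hc]))

-- the counting fold computes occurrence counts
theorem foldl_incrN_getD (ds : List Nat) (cnt : List Int) (v : Nat)
    (h : ∀ d ∈ ds, d < cnt.length) (hv : v < cnt.length) :
    (ds.foldl incrN cnt).getD v 0 = cnt.getD v 0 + (ds.count v : Int) := by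
  induction ds generalizing cnt with
  | nil => simp
  | cons d ds ih =>
      have hd : d < cnt.length := h d (by simp)
      simp only [List.foldl_cons, List.count_cons]
      rw [ih (incrN cnt d) (by simpa [incrN] using fun x hx => h x (by simp [hx]))
            (by simpa [incrN] using hv)]
      simp only [incrN]
      rw [getD_set_int cnt d v _ hd]
      by_cases hvd : v = d
      · rw [if_pos hvd, if_pos (by simp [hvd])]
        push_cast; rw [hvd]; ring
      · rw [if_neg hvd, if_neg (by simp [beq_iff_eq]; omega)]
        push_cast; ring

theorem length_foldl_swapN (n : Nat) (ds : List Nat) (l : List Char) :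
    (ds.foldl (swapN n) l).length = l.length := by
  induction ds generalizing l with
  | nil => rfl
  | cons d ds ih => simp [List.foldl_cons, ih, length_swapN]

-- value of a swapped position after applying one swap
theorem getD_swapN (n : Nat) (l : List Char) (d k : Nat) (hl : l.length = n)
    (hd : d < n) :
    (swapN n l d).getD k ' ' =
      if k = n - 1 - d then l.getD d ' '
      else if k = d then l.getD (n - 1 - d) ' '
      else l.getD k ' ' := by
  simp only [swapN]
  rw [getD_set_char _ (n - 1 - d) k _ (by simp [hl]; omega),
      getD_set_char l d k _ (by omega)]


-- MAIN MODEL LEMMA: the repeated symmetric swaps resolve pointwise to a parity test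
theorem fold_swap_parity (n : Nat) (ds : List Nat) (l : List Char) (hl : l.length = n)
    (hds : ∀ d ∈ ds, d < n) (k : Nat) (hk : k < n) :
    (ds.foldl (swapN n) l).getD k ' ' =
      if (ds.count k + ds.count (n - 1 - k)) % 2 = 1
      then l.getD (n - 1 - k) ' ' else l.getD k ' ' := by
  induction ds generalizing l with
  | nil => simp
  | cons d ds ih =>
      have hd : d < n := hds d (by simp)
      simp only [List.foldl_cons]
      rw [ih (swapN n l d) (by rw [length_swapN]; exact hl) (fun x hx => hds x (by simp [hx]))]
      rw [getD_swapN n l d k hl hd, getD_swapN n l d (n - 1 - k) hl hd]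
      have hcc : ∀ v : Nat, List.count v (d :: ds) = List.count v ds + if d = v then 1 else 0 := by
        intro v; rw [List.count_cons]; simp [beq_iff_eq]
      rw [hcc k, hcc (n - 1 - k)]
      by_cases hmid : k = n - 1 - k
      · -- middle position: the swap is a no-op and both parity branches coincide
        rw [← hmid]
        have hform : (if k = n - 1 - d then l.getD d ' '
            else if k = d then l.getD (n - 1 - d) ' ' else l.getD k ' ') = l.getD k ' ' := by
          by_cases hdk : k = d
          · rw [if_pos (by omega)]; congr 1; omega
          · rw [if_neg (by omega), if_neg hdk]
        rw [hform]
        simp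
      · by_cases hdk : d = k <;> by_cases hdk2 : d = n - 1 - k
        · exact absurd (by omega : k = n - 1 - k) hmid
        · -- d = k: this swap toggles the pair, parity of the count flips
          rw [if_pos (show n - 1 - k = n - 1 - d by omega), if_neg (show ¬ k = n - 1 - d by omega),
              if_pos hdk.symm, if_pos hdk, if_neg hdk2]
          have g1 : l.getD d ' ' = l.getD k ' ' := by rw [hdk]
          have g2 : l.getD (n - 1 - d) ' ' = l.getD (n - 1 - k) ' ' := by rw [hdk]
          rw [g1, g2]
          by_cases hp : (List.count k ds + List.count (n - 1 - k) ds) % 2 = 1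
          · rw [if_pos hp, if_neg (by omega)]
          · rw [if_neg hp, if_pos (by omega)]
        · -- d = n-1-k: the other digit of the pair, parity flips likewise
          rw [if_neg (show ¬ n - 1 - k = n - 1 - d by omega), if_pos hdk2.symm,
              if_pos (show k = n - 1 - d by omega), if_neg hdk, if_pos hdk2]
          have g1 : l.getD d ' ' = l.getD (n - 1 - k) ' ' := by rw [hdk2]
          have g2 : l.getD (n - 1 - d) ' ' = l.getD k ' ' := by congr 1; omega
          rw [g1, g2]
          by_cases hp : (List.count k ds + List.count (n - 1 - k) ds) % 2 = 1
          · rw [if_pos hp, if_neg (by omega)]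
          · rw [if_neg hp, if_pos (by omega)]
        · -- digit touches neither cell: nothing changes
          rw [if_neg (show ¬ n - 1 - k = n - 1 - d by omega), if_neg (show ¬ n - 1 - k = d by omega),
              if_neg (show ¬ k = n - 1 - d by omega), if_neg (show ¬ k = d by omega),
              if_neg hdk, if_neg hdk2, Nat.add_zero, Nat.add_zero]

-- ===== VERDICT (by name: the statement is the Claim_ definition above) =====
theorem abcd4_spec : Claim_equal_abcd4 := by
  intro s t _hdom hpre
  unfold Spec_abcd4 abcd4 abcd4_alt
  set b := t.toList with hb
  set n := b.length with hn
  have hpre' : ∀ c ∈ s.toList, c.isDigit = true ∧ c.toNat - 48 < n := by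
    intro c hc
    have := (List.all_eq_true.mp hpre) c hc
    simpa using this
  set ds := s.toList.map (fun c => c.toNat - 48) with hds
  have hdsn : ∀ d ∈ ds, d < n := by
    intro d hd
    rw [hds] at hd
    obtain ⟨c, hc, rfl⟩ := List.mem_map.mp hd
    exact (hpre' c hc).2
  rw [foldA_eq n s.toList b rfl hpre',
      foldB_eq n s.toList (List.replicate n 0) (by simp) hpre']
  simp only [← hds]
  rw [PySem.List.pyRange_zero_nat, List.map_map]
  -- pointwise equality of the two result lists
  refine congrArg String.mk (List.ext_getElem ?_ ?_)
  · simp [length_foldl_swapN]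
    exact hn.symm
  · intro k hk1 hk2
    have hkn : k < n := by simpa [length_foldl_swapN] using hk1
    have hgetD : (ds.foldl (swapN n) b)[k] = (ds.foldl (swapN n) b).getD k ' ' := by
      rw [List.getD_eq_getElem?_getD, List.getElem?_eq_getElem hk1]; rfl
    rw [hgetD, fold_swap_parity n ds b rfl hdsn k hkn]
    simp only [List.getElem_map, List.getElem_range, Function.comp]
    have hcast : ((n : Int)) - 1 - (k : Int) = ((n - 1 - k : Nat) : Int) := by omega
    rw [hcast]
    have hcnt : ∀ v : Nat, v < n →
        PySem.List.pyGetD (ds.foldl incrN (List.replicate n (0:Int))) ((v : Nat) : Int) 0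
          = (ds.count v : Int) := by
      intro v hv
      rw [PySem.List.pyGetD_natCast]
      rw [foldl_incrN_getD ds _ v (by simpa using hdsn) (by simpa using hv)]
      simp [List.getD_eq_getElem?_getD, List.getElem?_replicate, hv]
    rw [hcnt k hkn, hcnt (n - 1 - k) (by omega)]
    have hmod : PySem.Int.mod ((ds.count k : Int) + (ds.count (n - 1 - k) : Int)) 2
        = ((ds.count k + ds.count (n - 1 - k)) % 2 : Nat) := by
      push_cast
      exact_mod_cast PySem.Int.mod_natCast (ds.count k + ds.count (n - 1 - k)) 2
    rw [hmod]
    by_cases hp : (ds.count k + ds.count (n - 1 - k)) % 2 = 1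
    · rw [if_pos hp, PySem.List.pyGetD_natCast]
      simp [hp, List.getD_eq_getElem?_getD, List.getElem?_eq_getElem (show n - 1 - k < b.length by omega)]
    · rw [if_neg hp, PySem.List.pyGetD_natCast]
      have : ((ds.count k + ds.count (n - 1 - k)) % 2 : Nat) ≠ (1 : Nat) := hp
      simp [beq_iff_eq, this, List.getD_eq_getElem?_getD, List.getElem?_eq_getElem hkn]
      intro hcontra
      exact absurd (by exact_mod_cast hcontra) this
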